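-- pv_equiv track=rewrite | github.com/koii-network/builder-247 | agent-framework/prometheus_swarm/utils/joke_filter.py | filter_jokes
-- ===== SOURCE A (Python) =====
-- from typing import List, Optional
--
-- def filter_jokes(jokes: List[str],
--                  min_length: Optional[int] = None,
--                  max_length: Optional[int] = None,
--                  contains: Optional[str] = None,
--                  exclude_contains: Optional[str] = None) -> List[str]:
--     """
--     Filter jokes based on multiple criteria.
--
--     Args:
--         jokes (List[str]): List of jokes to filter
--         min_length (Optional[int]): Minimum length of joke text. Defaults to None.
--         max_length (Optional[int]): Maximum length of joke text. Defaults to None.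
--         contains (Optional[str]): Substring that joke must contain. Defaults to None.
--         exclude_contains (Optional[str]): Substring that joke must not contain. Defaults to None.
--
--     Returns:
--         List[str]: Filtered list of jokes
--     """
--     if not jokes:
--         return []
--
--     filtered_jokes = jokes.copy()
--
--     # Apply minimum length filter
--     if min_length is not None:
--         filtered_jokes = [joke for joke in filtered_jokes if len(joke) >= min_length]
--
--     # Apply maximum length filter
--     if max_length is not None:
--         filtered_jokes = [joke for joke in filtered_jokes if len(joke) <= max_length]
--
--     # Apply contains filter
--     if contains is not None:
--         filtered_jokes = [joke for joke in filtered_jokes if contains.lower() in joke.lower()]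
--
--     # Apply exclude contains filter
--     if exclude_contains is not None:
--         filtered_jokes = [joke for joke in filtered_jokes if exclude_contains.lower() not in joke.lower()]
--
--     return filtered_jokes
-- ===== SOURCE B (Python) =====
-- from typing import List, Optional
--
-- def filter_jokes(jokes: List[str],
--                  min_length: Optional[int] = None,
--                  max_length: Optional[int] = None,
--                  contains: Optional[str] = None,
--                  exclude_contains: Optional[str] = None) -> List[str]:
--     """Single-pass filter: one combined predicate instead of four sequential passes."""
--     def keep(joke):
--         low = joke.lower()
--         return ((min_length is None or len(joke) >= min_length)
--                 and (max_length is None or len(joke) <= max_length)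
--                 and (contains is None or contains.lower() in low)
--                 and (exclude_contains is None or exclude_contains.lower() not in low))
--     return [joke for joke in jokes if keep(joke)]
-- ===== Notes on version B (the rewrite author's own statement) =====
-- stated objective: simpler
-- what changed: Replaces four sequential filtering passes (each building an intermediate list, plus an empty-list guard) with one pass over jokes using a single combined predicate that lowercases each joke once.
import Mathlib
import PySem

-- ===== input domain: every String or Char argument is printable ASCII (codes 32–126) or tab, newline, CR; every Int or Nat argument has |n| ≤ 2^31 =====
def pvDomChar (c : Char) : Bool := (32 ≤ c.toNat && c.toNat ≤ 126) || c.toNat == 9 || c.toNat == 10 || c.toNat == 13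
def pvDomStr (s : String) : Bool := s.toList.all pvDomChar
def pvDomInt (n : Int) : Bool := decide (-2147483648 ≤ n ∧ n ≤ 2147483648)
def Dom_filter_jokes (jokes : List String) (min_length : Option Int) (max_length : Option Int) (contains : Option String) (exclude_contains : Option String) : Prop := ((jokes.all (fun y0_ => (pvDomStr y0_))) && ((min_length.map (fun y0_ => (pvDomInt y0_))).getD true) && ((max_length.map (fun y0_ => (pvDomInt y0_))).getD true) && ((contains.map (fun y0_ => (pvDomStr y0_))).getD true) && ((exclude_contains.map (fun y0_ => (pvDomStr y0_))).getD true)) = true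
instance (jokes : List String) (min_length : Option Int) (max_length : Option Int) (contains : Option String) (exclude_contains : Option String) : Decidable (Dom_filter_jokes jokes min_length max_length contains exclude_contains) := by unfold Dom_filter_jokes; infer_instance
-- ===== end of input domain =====

-- B replaces A's four sequential filtering passes with one combined-predicate pass (same results; objective: simpler).
-- ===== PORT A =====
def filter_jokes (jokes : List String) (min_length : Option Int) (max_length : Option Int) (contains : Option String) (exclude_contains : Option String) : List String :=
  if jokes = [] then []
  else
    let f0 := jokes
    let f1 := match min_length with
      | some m => f0.filter (fun joke => decide (PySem.Str.len joke ≥ m))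
      | none => f0
    let f2 := match max_length with
      | some m => f1.filter (fun joke => decide (PySem.Str.len joke ≤ m))
      | none => f1
    let f3 := match contains with
      | some s => f2.filter (fun joke => PySem.Str.isIn (PySem.Str.lower s) (PySem.Str.lower joke))
      | none => f2
    let f4 := match exclude_contains with
      | some s => f3.filter (fun joke => !PySem.Str.isIn (PySem.Str.lower s) (PySem.Str.lower joke))
      | none => f3
    f4

-- ===== PORT B =====
-- B: one pass with a single combined predicate; the joke is lowercased once per element
def fjKeep (min_length : Option Int) (max_length : Option Int) (contains : Option String) (exclude_contains : Option String) (joke : String) : Bool :=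
  let low := PySem.Str.lower joke
  (match min_length with | none => true | some m => decide (PySem.Str.len joke ≥ m)) &&
  (match max_length with | none => true | some m => decide (PySem.Str.len joke ≤ m)) &&
  (match contains with | none => true | some s => PySem.Str.isIn (PySem.Str.lower s) low) &&
  (match exclude_contains with | none => true | some s => !PySem.Str.isIn (PySem.Str.lower s) low)

def filter_jokes_alt (jokes : List String) (min_length : Option Int) (max_length : Option Int) (contains : Option String) (exclude_contains : Option String) : List String :=
  jokes.filter (fjKeep min_length max_length contains exclude_contains)

-- ===== PRECONDITION & SPEC =====
def Spec_filter_jokes (jokes : List String) (min_length : Option Int) (max_length : Option Int) (contains : Option String) (exclude_contains : Option String) (out : List String) : Prop := out = filter_jokes_alt jokes min_length max_length contains exclude_contains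
instance (jokes : List String) (min_length : Option Int) (max_length : Option Int) (contains : Option String) (exclude_contains : Option String) (out : List String) : Decidable (Spec_filter_jokes jokes min_length max_length contains exclude_contains out) := by unfold Spec_filter_jokes; infer_instance

-- ===== CLAIM (what is proved, stated in full; the proofs are below) =====
def Claim_equal_filter_jokes : Prop := ∀ (jokes : List String) (min_length : Option Int) (max_length : Option Int) (contains : Option String) (exclude_contains : Option String), Dom_filter_jokes jokes min_length max_length contains exclude_contains → Spec_filter_jokes jokes min_length max_length contains exclude_contains (filter_jokes jokes min_length max_length contains exclude_contains)

-- ===== LEMMAS AND PROOFS =====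

-- ===== VERDICT (by name: the statement is the Claim_ definition above) =====
theorem filter_jokes_spec : Claim_equal_filter_jokes := by
  intro jokes ml xl c e _
  unfold Spec_filter_jokes filter_jokes filter_jokes_alt
  rcases jokes with _ | ⟨j, js⟩
  · simp
  · rcases ml <;> rcases xl <;> rcases c <;> rcases e <;>
      simp only [reduceIte, List.filter_filter, reduceCtorEq] <;>
      first
        | (symm
           rw [List.filter_eq_self]
           intro a _
           simp [fjKeep])
        | (apply List.filter_congr
           intro a _
           simp only [fjKeep, Bool.true_and, Bool.and_true]
           try ac_rfl)
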